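-- pv_equiv track=rewrite | github.com/jtompkins84/ascii_art_generator | symmap.py | __build_value_to_symbol_map
-- ===== SOURCE A (Python) =====
-- def __build_value_to_symbol_map(clamped_value_to_symbol_map):
--     """
--     Builds a reduced value-to-symbol dictionary mapping based on the clamped values of the clamped-norm dictionary.
--
--     A value can only be associated with one symbol. If a value already has a mapping to a symbol and both symbols are
--     a special character, the new symbol will become the mapping for the value. Otherwise, no action is taken and
--     the unmapped symbol is ignored. The result is a dictionary where each key represents a value between 0 and 255.
--     """
--     value_to_symbol_map = dict()
--     for key in clamped_value_to_symbol_map: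
--         value = clamped_value_to_symbol_map[key]
--         if value not in value_to_symbol_map:
--             value_to_symbol_map[value] = key
--         else:
--             sym = value_to_symbol_map[value]
--             if __is_special_char(sym) and __is_special_char(key):
--                 value_to_symbol_map[value] = key
--     return value_to_symbol_map
--
-- def __is_special_char(sym):
--     return sym < 65 or (90 < sym < 97) or sym > 122
-- ===== SOURCE B (Python) =====
-- def __is_special_char(sym):
--     return sym < 65 or (90 < sym < 97) or sym > 122
--
--
-- def __build_value_to_symbol_map(clamped_value_to_symbol_map):
--     """Two-pass rewrite: record per value its first key and its last special key,
--     then pick last_special[value] when the first key is special, else the first key."""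
--     first = {}
--     last_special = {}
--     for key in clamped_value_to_symbol_map:
--         value = clamped_value_to_symbol_map[key]
--         if value not in first:
--             first[value] = key
--         if __is_special_char(key):
--             last_special[value] = key
--     return {value: (last_special.get(value, k) if __is_special_char(k) else k)
--             for value, k in first.items()}
-- ===== Notes on version B (the rewrite author's own statement) =====
-- stated objective: alternative
-- what changed: Replaces A's incremental replace-only-if-both-special loop by a two-dict pass (first key per value, last special key per value) followed by a closed-rule rebuild: pick the last special key when the value's first key is special, else the first key.
import Mathlib
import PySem

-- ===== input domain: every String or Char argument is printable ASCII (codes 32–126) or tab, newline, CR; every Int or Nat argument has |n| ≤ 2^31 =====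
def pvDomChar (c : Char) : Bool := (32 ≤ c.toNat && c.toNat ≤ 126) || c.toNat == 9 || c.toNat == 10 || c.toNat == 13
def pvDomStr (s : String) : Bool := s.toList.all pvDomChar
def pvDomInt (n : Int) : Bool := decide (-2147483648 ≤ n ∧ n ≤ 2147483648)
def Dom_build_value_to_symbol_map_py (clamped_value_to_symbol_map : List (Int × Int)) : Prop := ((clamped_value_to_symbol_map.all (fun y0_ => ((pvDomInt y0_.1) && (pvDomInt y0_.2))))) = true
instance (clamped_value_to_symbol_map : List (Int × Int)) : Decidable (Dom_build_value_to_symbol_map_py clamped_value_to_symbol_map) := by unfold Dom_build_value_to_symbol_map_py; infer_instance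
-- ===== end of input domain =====

-- B replaces A's replace-only-if-both-special update loop by a two-dict pass (first key / last special
-- key per value) plus a closed-rule rebuild; equal output (alternative decomposition, no speed claim).


-- ===== PORT A =====
-- __is_special_char(sym)
def is_special_char_py (sym : Int) : Bool :=
  decide (sym < 65) || (decide (90 < sym) && decide (sym < 97)) || decide (sym > 122)

-- clamped_value_to_symbol_map[key]; key is always one of the dict's keys, so get? is some
-- and the 0 default is never used (both Pythons perform this same lookup).
def pv_lookup (m : List (Int × Int)) (key : Int) : Int :=
  ((PySem.Dict.ofList m).get? key).getD 0

-- the body of A's for-loop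
def stepA (val : Int → Int) (acc : PySem.Dict Int Int) (key : Int) : PySem.Dict Int Int :=
  let value := val key
  if acc.contains value = false then acc.insert value key
  else
    let sym := acc.getD value 0
    if is_special_char_py sym && is_special_char_py key then acc.insert value key else acc

def build_value_to_symbol_map_py (clamped_value_to_symbol_map : List (Int × Int)) : List (Int × Int) :=
  ((clamped_value_to_symbol_map.map Prod.fst).foldl
      (stepA (pv_lookup clamped_value_to_symbol_map)) PySem.Dict.empty).items

-- ===== PORT B =====
-- the body of B's single pass: record first key per value, and last special key per value
def stepB (val : Int → Int) (p : PySem.Dict Int Int × PySem.Dict Int Int) (key : Int) :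
    PySem.Dict Int Int × PySem.Dict Int Int :=
  let value := val key
  let first := if p.1.contains value = false then p.1.insert value key else p.1
  let last_special := if is_special_char_py key then p.2.insert value key else p.2
  (first, last_special)

-- B's final dict comprehension over first.items
def finishB (first last_special : PySem.Dict Int Int) : PySem.Dict Int Int :=
  first.items.foldl
    (fun acc vk =>
      acc.insert vk.1 (if is_special_char_py vk.2 then last_special.getD vk.1 vk.2 else vk.2))
    PySem.Dict.empty

def build_value_to_symbol_map_py_alt (clamped_value_to_symbol_map : List (Int × Int)) : List (Int × Int) :=
  let p := (clamped_value_to_symbol_map.map Prod.fst).foldl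
      (stepB (pv_lookup clamped_value_to_symbol_map)) (PySem.Dict.empty, PySem.Dict.empty)
  (finishB p.1 p.2).items

-- ===== PRECONDITION & SPEC =====
-- Pre_ excludes association lists with duplicate first components: they do not encode a Python dict
-- (dict() collapses duplicate keys), so the Python A never receives them.
def Pre_build_value_to_symbol_map_py (clamped_value_to_symbol_map : List (Int × Int)) : Prop :=
  (clamped_value_to_symbol_map.map Prod.fst).Nodup

instance (clamped_value_to_symbol_map : List (Int × Int)) : Decidable (Pre_build_value_to_symbol_map_py clamped_value_to_symbol_map) := by unfold Pre_build_value_to_symbol_map_py; infer_instance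

def pvWitness_build_value_to_symbol_map_py : (List (Int × Int)) := [(65, 1), (33, 1), (97, 2), (34, 2)]

def Spec_build_value_to_symbol_map_py (clamped_value_to_symbol_map : List (Int × Int)) (out : List (Int × Int)) : Prop := out = build_value_to_symbol_map_py_alt clamped_value_to_symbol_map
instance (clamped_value_to_symbol_map : List (Int × Int)) (out : List (Int × Int)) : Decidable (Spec_build_value_to_symbol_map_py clamped_value_to_symbol_map out) := by unfold Spec_build_value_to_symbol_map_py; infer_instance

-- ===== CLAIM (what is proved, stated in full; the proofs are below) =====
def Claim_equal_build_value_to_symbol_map_py : Prop := ∀ (clamped_value_to_symbol_map : List (Int × Int)), Dom_build_value_to_symbol_map_py clamped_value_to_symbol_map → Pre_build_value_to_symbol_map_py clamped_value_to_symbol_map → Spec_build_value_to_symbol_map_py clamped_value_to_symbol_map (build_value_to_symbol_map_py clamped_value_to_symbol_map)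

-- ===== LEMMAS AND PROOFS =====

-- the value B's comprehension assigns to the entry (p.1 ↦ p.2) of `first`
def pvChoose (ls : PySem.Dict Int Int) (p : Int × Int) : Int :=
  if is_special_char_py p.2 then ls.getD p.1 p.2 else p.2

lemma items_finishB (f ls : PySem.Dict Int Int) (hf : f.keys.Nodup) :
    (finishB f ls).items = f.items.map (fun p => (p.1, pvChoose ls p)) := by
  unfold finishB pvChoose
  rw [PySem.Dict.items_foldl_insert_fresh]
  · rw [show (PySem.Dict.empty : PySem.Dict Int Int).items = [] from rfl]; simp
  · intro a _; exact PySem.Dict.contains_empty _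
  · exact hf

lemma keys_finishB (f ls : PySem.Dict Int Int) (hf : f.keys.Nodup) :
    (finishB f ls).keys = f.keys := by
  simp only [PySem.Dict.keys, items_finishB f ls hf, List.map_map]
  rfl

lemma nodup_keys_finishB (f ls : PySem.Dict Int Int) (hf : f.keys.Nodup) :
    (finishB f ls).keys.Nodup := by
  rw [keys_finishB f ls hf]; exact hf

lemma contains_finishB (f ls : PySem.Dict Int Int) (hf : f.keys.Nodup) (v : Int) :
    (finishB f ls).contains v = f.contains v := by
  rw [PySem.Dict.contains_eq_decide_mem_keys, PySem.Dict.contains_eq_decide_mem_keys,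
    keys_finishB f ls hf]

-- one loop iteration: A's step on the rendered dict equals rendering B's stepped dicts
lemma step_eq (val : Int → Int) (f ls : PySem.Dict Int Int) (k : Int)
    (hf : f.keys.Nodup)
    (h1 : ∀ p ∈ ls.items, is_special_char_py p.2 = true)
    (h2 : ∀ p ∈ f.items, is_special_char_py p.2 = true → ls.contains p.1 = true) :
    stepA val (finishB f ls) k = finishB (stepB val (f, ls) k).1 (stepB val (f, ls) k).2 := by
  unfold stepA stepB
  simp only []
  set v := val k with hv
  by_cases hc : f.contains v = false
  · -- v is a fresh value: both sides append the entry (v, k)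
    have hcf : (finishB f ls).contains v = false := by rw [contains_finishB f ls hf]; exact hc
    have hvk : v ∉ f.keys := by
      intro hmem
      rw [PySem.Dict.contains_eq_decide_mem_keys] at hc
      simp [hmem] at hc
    rw [if_pos hcf, if_pos hc]
    apply PySem.Dict.ext
    rw [PySem.Dict.items_insert_of_not_contains _ _ hcf,
      items_finishB f ls hf,
      items_finishB _ _ (PySem.Dict.nodup_keys_insert _ _ _ hf),
      PySem.Dict.items_insert_of_not_contains _ _ hc, List.map_append]
    congr 1
    · apply List.map_congr_left
      intro p hp
      have hne : p.1 ≠ v := fun h => hvk (h ▸ PySem.Dict.mem_keys_of_mem_items _ hp)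
      unfold pvChoose
      by_cases hk : is_special_char_py k = true
      · rw [if_pos hk, PySem.Dict.getD_insert_of_ne _ _ _ hne]
      · rw [if_neg hk]
    · unfold pvChoose
      by_cases hk : is_special_char_py k = true
      · simp [hk, PySem.Dict.getD_insert_self]
      · simp [hk]
  · -- v already mapped
    have hct : f.contains v = true := by revert hc; cases f.contains v <;> simp
    have hcf : ¬ ((finishB f ls).contains v = false) := by
      rw [contains_finishB f ls hf, hct]; simp
    obtain ⟨k0, hk0⟩ : ∃ k0, f.get? v = some k0 := by
      have := PySem.Dict.contains_eq_isSome_get? (d := f) (k := v)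
      rw [hct] at this
      exact Option.isSome_iff_exists.mp this.symm
    have hmem : (v, k0) ∈ f.items := PySem.Dict.mem_items_of_get?_eq_some _ hk0
    have hsym : (finishB f ls).getD v 0 = pvChoose ls (v, k0) := by
      refine PySem.Dict.getD_of_mem_items _ ?_ (nodup_keys_finishB f ls hf) 0
      rw [items_finishB f ls hf]
      exact List.mem_map_of_mem hmem
    rw [if_neg hcf, if_neg (by rw [hct]; simp : ¬ (f.contains v = false))]
    by_cases hk : is_special_char_py k = true
    · rw [if_pos hk]
      by_cases hs : is_special_char_py ((finishB f ls).getD v 0) = true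
      · -- both special: both sides replace the entry at v by k
        have hk0s : is_special_char_py k0 = true := by
          by_contra hk0s
          rw [hsym] at hs; unfold pvChoose at hs
          rw [if_neg hk0s] at hs
          exact hk0s hs
        rw [if_pos (by rw [hs, hk]; rfl : (is_special_char_py ((finishB f ls).getD v 0) && is_special_char_py k) = true)]
        apply PySem.Dict.ext
        rw [PySem.Dict.items_insert_of_contains _ _ (by rw [contains_finishB f ls hf]; exact hct),
          items_finishB f ls hf, items_finishB f _ hf, List.map_map]
        apply List.map_congr_left
        intro p hp
        by_cases hpv : p.1 = v
        · have hp2 : p.2 = k0 := by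
            have := PySem.Dict.get?_of_mem_items (d := f) (k := p.1) (v := p.2) hp hf
            rw [hpv, hk0] at this
            exact (Option.some_inj.mp this).symm
          simp only [Function.comp_apply]
          rw [if_pos (by simp [hpv])]
          unfold pvChoose
          rw [hp2, if_pos hk0s, hpv, PySem.Dict.getD_insert_self]
        · simp only [Function.comp_apply]
          rw [if_neg (by simp [hpv])]
          unfold pvChoose
          by_cases hps : is_special_char_py p.2 = true
          · rw [if_pos hps, if_pos hps, PySem.Dict.getD_insert_of_ne _ _ _ hpv]
          · rw [if_neg hps, if_neg hps]
      · -- current symbol not special: the stored first key is not special, nothing changes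
        have hk0s : is_special_char_py k0 = false := by
          by_contra h
          have hk0t : is_special_char_py k0 = true := by revert h; cases is_special_char_py k0 <;> simp
          have hlc : ls.contains v = true := h2 (v, k0) hmem hk0t
          obtain ⟨w, hw⟩ : ∃ w, ls.get? v = some w := by
            have := PySem.Dict.contains_eq_isSome_get? (d := ls) (k := v)
            rw [hlc] at this
            exact Option.isSome_iff_exists.mp this.symm
          have hws : is_special_char_py w = true := h1 (v, w) (PySem.Dict.mem_items_of_get?_eq_some _ hw)
          apply hs
          rw [hsym]; unfold pvChoose
          rw [if_pos hk0t, PySem.Dict.getD_of_get?_eq_some _ _ hw]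
          exact hws
        rw [if_neg (by rw [Bool.and_eq_true]; intro h; exact hs h.1)]
        apply PySem.Dict.ext
        rw [items_finishB f ls hf, items_finishB f _ hf]
        apply List.map_congr_left
        intro p hp
        by_cases hpv : p.1 = v
        · have hp2 : p.2 = k0 := by
            have := PySem.Dict.get?_of_mem_items (d := f) (k := p.1) (v := p.2) hp hf
            rw [hpv, hk0] at this
            exact (Option.some_inj.mp this).symm
          unfold pvChoose
          rw [hp2, if_neg (by rw [hk0s]; simp), if_neg (by rw [hk0s]; simp)]
        · unfold pvChoose
          by_cases hps : is_special_char_py p.2 = true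
          · rw [if_pos hps, if_pos hps, PySem.Dict.getD_insert_of_ne _ _ _ hpv]
          · rw [if_neg hps, if_neg hps]
    · -- new key not special: neither side changes anything
      rw [if_neg (by rw [Bool.and_eq_true]; intro h; exact hk h.2), if_neg hk]

lemma loop_inv (val : Int → Int) (ks : List Int) :
    ∀ (f ls : PySem.Dict Int Int),
      f.keys.Nodup → ls.keys.Nodup →
      (∀ p ∈ ls.items, is_special_char_py p.2 = true) →
      (∀ p ∈ f.items, is_special_char_py p.2 = true → ls.contains p.1 = true) →
      ks.foldl (stepA val) (finishB f ls) =
        finishB (ks.foldl (stepB val) (f, ls)).1 (ks.foldl (stepB val) (f, ls)).2 := by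
  induction ks with
  | nil => intro f ls _ _ _ _; rfl
  | cons k ks ih =>
    intro f ls hf hls h1 h2
    simp only [List.foldl_cons]
    rw [step_eq val f ls k hf h1 h2]
    have hstep : stepB val (f, ls) k =
        ((if f.contains (val k) = false then f.insert (val k) k else f),
         (if is_special_char_py k = true then ls.insert (val k) k else ls)) := rfl
    set v := val k with hv
    have hlsmono : ∀ x, ls.contains x = true →
        (if is_special_char_py k = true then ls.insert v k else ls).contains x = true := by
      intro x hx
      by_cases hk : is_special_char_py k = true
      · rw [if_pos hk, PySem.Dict.contains_insert, hx]; simp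
      · rw [if_neg hk]; exact hx
    rw [hstep]
    apply ih
    · by_cases hc : f.contains v = false
      · rw [if_pos hc]; exact PySem.Dict.nodup_keys_insert _ _ _ hf
      · rw [if_neg hc]; exact hf
    · by_cases hk : is_special_char_py k = true
      · rw [if_pos hk]; exact PySem.Dict.nodup_keys_insert _ _ _ hls
      · rw [if_neg hk]; exact hls
    · intro p hp
      by_cases hk : is_special_char_py k = true
      · rw [if_pos hk] at hp
        rcases (PySem.Dict.mem_items_insert _ _ _ _).mp hp with h | h
        · rw [h]; exact hk
        · exact h1 p h.1
      · rw [if_neg hk] at hp; exact h1 p hp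
    · intro p hp hps
      by_cases hc : f.contains v = false
      · rw [if_pos hc] at hp
        rcases (PySem.Dict.mem_items_insert _ _ _ _).mp hp with h | h
        · rw [h]
          have hk : is_special_char_py k = true := by rw [h] at hps; exact hps
          rw [if_pos hk]
          exact PySem.Dict.contains_insert_self _ _ _
        · exact hlsmono p.1 (h2 p h.1 hps)
      · rw [if_neg hc] at hp
        exact hlsmono p.1 (h2 p hp hps)


-- ===== VERDICT (by name: the statement is the Claim_ definition above) =====
theorem build_value_to_symbol_map_py_spec : Claim_equal_build_value_to_symbol_map_py := by
  intro m _hdom _hpre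
  unfold Spec_build_value_to_symbol_map_py build_value_to_symbol_map_py build_value_to_symbol_map_py_alt
  have hbase : (PySem.Dict.empty : PySem.Dict Int Int) = finishB PySem.Dict.empty PySem.Dict.empty := rfl
  conv_lhs => rw [hbase]
  rw [loop_inv (pv_lookup m) (m.map Prod.fst) PySem.Dict.empty PySem.Dict.empty
      (by simp [PySem.Dict.keys_empty]) (by simp [PySem.Dict.keys_empty])
      (by intro p hp; simp [show (PySem.Dict.empty : PySem.Dict Int Int).items = [] from rfl] at hp)
      (by intro p hp; simp [show (PySem.Dict.empty : PySem.Dict Int Int).items = [] from rfl] at hp)]
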